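-- pv_equiv track=rewrite | github.com/vmware-labs/verified-betrfs | lib/Crypto/gen2.py | prove
-- ===== SOURCE A (Python) =====
-- def prove(v, i):
--   if i == 0:
--     return "    assert bits_of_int("+str(v) + ", "+str(i)+") == [];"
--   else:
--     return ("    assert bits_of_int("+str(v) + ", "+str(i)+") == ["+bool_list(v,0,i)+"] by {\n"
--         + prove(v//2, i-1) + "\n"
--         + "    assert bits_of_int("+str(v) + ", "+str(i)+") == ["+("true" if v&1 else "false")+"]+bits_of_int("+str(v//2)+", "+str(i-1)+");\n"
--     +"    }")
--
-- def bool_list(val, i, j):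
--   s = []
--   for k in range(i, j):
--     s.append("true" if (val>>k)&1 else "false")
--   return ", ".join(s)
-- ===== SOURCE B (Python) =====
-- def prove(v, i):
--     # One pass: compute the value/bit sequence once, then build the proof text
--     # bottom-up, extending the comma-joined bit list incrementally.
--     vals = []
--     bits = []
--     u = v
--     for _ in range(i):
--         vals.append(u)
--         bits.append("true" if u & 1 else "false")
--         u //= 2
--     out = "    assert bits_of_int(" + str(u) + ", 0) == [];"
--     n = 0
--     suffix = ""
--     for w, b in zip(reversed(vals), reversed(bits)):
--         suffix = b + (", " + suffix if suffix else "")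
--         out = ("    assert bits_of_int(" + str(w) + ", " + str(n + 1) + ") == [" + suffix + "] by {\n"
--                + out + "\n"
--                + "    assert bits_of_int(" + str(w) + ", " + str(n + 1) + ") == [" + b
--                + "]+bits_of_int(" + str(w // 2) + ", " + str(n) + ");\n"
--                + "    }")
--         n += 1
--     return out
-- ===== Notes on version B (the rewrite author's own statement) =====
-- stated objective: alternative
-- what changed: Replaces the recursion that re-scans all i bits at every level (bool_list(v,0,i) recomputed per call) by one iterative pass that computes the value/bit sequence once and builds the proof text bottom-up, extending the comma-joined bit list incrementally; cost is the same since the output text itself is quadratic in i.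
import Mathlib
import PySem

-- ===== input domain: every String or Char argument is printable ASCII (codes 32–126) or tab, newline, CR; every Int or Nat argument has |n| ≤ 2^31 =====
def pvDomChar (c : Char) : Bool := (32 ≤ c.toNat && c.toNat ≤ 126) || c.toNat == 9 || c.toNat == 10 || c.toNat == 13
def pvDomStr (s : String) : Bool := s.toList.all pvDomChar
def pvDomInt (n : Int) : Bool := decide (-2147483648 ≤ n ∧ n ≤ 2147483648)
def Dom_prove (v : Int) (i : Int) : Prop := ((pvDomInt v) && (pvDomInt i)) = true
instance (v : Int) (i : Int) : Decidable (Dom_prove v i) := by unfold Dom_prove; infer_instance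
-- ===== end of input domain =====

-- B builds the proof text bottom-up in one pass (bit list extended incrementally)
-- instead of A's recursion that re-scans all i bits at every level.

-- ===== PORT A =====
-- bool_list(val, i, j): "true"/"false" of (val>>k)&1 for k in range(i, j), joined by ", ".
-- (val >> k) is ported as val >>> k.toNat: exact for 0 ≤ k, which holds for every k
-- range(0, j) yields (A only calls bool_list with i = 0).
def boolList (val : Int) (i : Int) (j : Int) : String :=
  PySem.Str.join ", " ((PySem.List.pyRange i j 1).foldl
    (fun (s : List String) (k : Int) =>
      s ++ [if PySem.Int.band (val >>> k.toNat) 1 ≠ 0 then "true" else "false"]) [])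

-- prove(v, i), recursion carried by a fuel counter: fuel = i.toNat is enough for 0 ≤ i;
-- for i < 0 the Python recursion never reaches the base case (RecursionError, outside Pre_),
-- the port returns "" when fuel runs out there.
def proveFuel (v : Int) (i : Int) : Nat → String
  | 0 => ""
  | fuel + 1 =>
    if i == 0 then
      "    assert bits_of_int(" ++ PySem.Int.toStr v ++ ", " ++ PySem.Int.toStr i ++ ") == [];"
    else
      "    assert bits_of_int(" ++ PySem.Int.toStr v ++ ", " ++ PySem.Int.toStr i ++ ") == ["
        ++ boolList v 0 i ++ "] by {\n"
        ++ proveFuel (PySem.Int.floordiv v 2) (i - 1) fuel ++ "\n"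
        ++ "    assert bits_of_int(" ++ PySem.Int.toStr v ++ ", " ++ PySem.Int.toStr i ++ ") == ["
        ++ (if PySem.Int.band v 1 ≠ 0 then "true" else "false")
        ++ "]+bits_of_int(" ++ PySem.Int.toStr (PySem.Int.floordiv v 2) ++ ", "
        ++ PySem.Int.toStr (i - 1) ++ ");\n" ++ "    }"

def prove (v : Int) (i : Int) : String := proveFuel v i (i.toNat + 1)

-- ===== PORT B =====
-- "true" if u & 1 else "false"
def bitStr (u : Int) : String := if PySem.Int.band u 1 ≠ 0 then "true" else "false"

-- first loop of B: vals, bits, u after i halving steps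
def bLoop1 (v : Int) (i : Int) : List Int × List String × Int :=
  (PySem.List.pyRange 0 i 1).foldl
    (fun (st : List Int × List String × Int) _ =>
      (st.1 ++ [st.2.2], st.2.1 ++ [bitStr st.2.2], PySem.Int.floordiv st.2.2 2))
    ([], [], v)

-- body of B's second loop: state (out, suffix, n), element (w, b)
def bStep (st : String × String × Int) (p : Int × String) : String × String × Int :=
  let suffix' := p.2 ++ (if st.2.1 ≠ "" then ", " ++ st.2.1 else "")
  ("    assert bits_of_int(" ++ PySem.Int.toStr p.1 ++ ", " ++ PySem.Int.toStr (st.2.2 + 1)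
     ++ ") == [" ++ suffix' ++ "] by {\n"
     ++ st.1 ++ "\n"
     ++ "    assert bits_of_int(" ++ PySem.Int.toStr p.1 ++ ", " ++ PySem.Int.toStr (st.2.2 + 1)
     ++ ") == [" ++ p.2 ++ "]+bits_of_int(" ++ PySem.Int.toStr (PySem.Int.floordiv p.1 2) ++ ", "
     ++ PySem.Int.toStr st.2.2 ++ ");\n" ++ "    }",
   suffix', st.2.2 + 1)

def prove_alt (v : Int) (i : Int) : String :=
  let r := bLoop1 v i
  let res := ((r.1.reverse).zip (r.2.1.reverse)).foldl bStep
    ("    assert bits_of_int(" ++ PySem.Int.toStr r.2.2 ++ ", 0) == [];", "", (0 : Int))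
  res.1

-- ===== PRECONDITION & SPEC =====
-- Pre_ excludes i < 0, where A's recursion i-1 never reaches the base case and raises RecursionError.
def Pre_prove (v : Int) (i : Int) : Prop := 0 ≤ i
instance (v : Int) (i : Int) : Decidable (Pre_prove v i) := by unfold Pre_prove; infer_instance
def pvWitness_prove : Int × Int := (5, 3)

def Spec_prove (v : Int) (i : Int) (out : String) : Prop := out = prove_alt v i
instance (v : Int) (i : Int) (out : String) : Decidable (Spec_prove v i out) := by unfold Spec_prove; infer_instance

-- ===== CLAIM (what is proved, stated in full; the proofs are below) =====
def Claim_equal_prove : Prop := ∀ (v : Int) (i : Int), Dom_prove v i → Pre_prove v i → Spec_prove v i (prove v i)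

-- ===== LEMMAS AND PROOFS =====

-- the value sequence v, v//2, v//4, … and its n-th element
def valsL : Int → Nat → List Int
  | _, 0 => []
  | v, n + 1 => v :: valsL (PySem.Int.floordiv v 2) n

def iterHalf : Int → Nat → Int
  | v, 0 => v
  | v, n + 1 => iterHalf (PySem.Int.floordiv v 2) n

-- the incrementally maintained suffix string
def sufS (v : Int) (n : Nat) : String := PySem.Str.join ", " ((valsL v n).map bitStr)

lemma iterHalf_succ_right (n : Nat) : ∀ v, iterHalf v (n + 1) = PySem.Int.floordiv (iterHalf v n) 2 := by
  induction n with
  | zero => intro v; rfl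
  | succ n ih => intro v; exact ih (PySem.Int.floordiv v 2)

lemma valsL_succ_right (n : Nat) : ∀ v, valsL v (n + 1) = valsL v n ++ [iterHalf v n] := by
  induction n with
  | zero => intro v; rfl
  | succ n ih =>
    intro v
    show v :: valsL (PySem.Int.floordiv v 2) (n + 1) = (v :: valsL (PySem.Int.floordiv v 2) n) ++ _
    rw [ih (PySem.Int.floordiv v 2)]; rfl

lemma length_valsL (n : Nat) : ∀ v, (valsL v n).length = n := by
  induction n with
  | zero => intro v; rfl
  | succ n ih => intro v; simpa [valsL] using ih (PySem.Int.floordiv v 2)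

lemma bLoop1_spec (n : Nat) (v : Int) :
    bLoop1 v (n : Int) = (valsL v n, (valsL v n).map bitStr, iterHalf v n) := by
  induction n generalizing v with
  | zero => rfl
  | succ n ih =>
    -- fold over range(0, n+1) = range(0, n) ++ [n]
    unfold bLoop1
    have hr : PySem.List.pyRange 0 ((n + 1 : Nat) : Int) 1
        = PySem.List.pyRange 0 (n : Int) 1 ++ [(n : Int)] := by
      have := PySem.List.pyRange_one_succ_right (a := 0) (b := (n : Int)) (by positivity)
      push_cast
      push_cast at this
      exact this
    rw [hr, List.foldl_append]
    have := ih v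
    unfold bLoop1 at this
    rw [this]
    simp only [List.foldl_cons, List.foldl_nil]
    rw [valsL_succ_right, iterHalf_succ_right]
    simp

lemma sr_one (m : Int) : m >>> (1 : Nat) = PySem.Int.floordiv m 2 := by
  rw [Int.shiftRight_eq_div_pow, PySem.Int.floordiv_eq_ediv_of_pos (by norm_num)]
  norm_num

lemma sr_succ (m : Int) (k : Nat) : m >>> (k + 1) = (PySem.Int.floordiv m 2) >>> k := by
  rw [← sr_one, ← Int.shiftRight_add m 1 k, Nat.add_comm]

-- the bit strings as a map over List.range
lemma range_map_bits (n : Nat) : ∀ v : Int,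
    (List.range n).map (fun (k : Nat) => if PySem.Int.band (v >>> k) 1 ≠ 0 then "true" else "false")
      = (valsL v n).map bitStr := by
  induction n with
  | zero => intro v; rfl
  | succ n ih =>
    intro v
    rw [List.range_succ_eq_map, List.map_cons, List.map_map]
    show _ :: _ = bitStr v :: (valsL (PySem.Int.floordiv v 2) n).map bitStr
    refine congrArg₂ List.cons (by simp [bitStr]) ?_
    rw [← ih (PySem.Int.floordiv v 2)]
    apply List.map_congr_left
    intro k _
    simp [Function.comp, sr_succ]

lemma boolList_eq_sufS (n : Nat) (v : Int) : boolList v 0 (n : Int) = sufS v n := by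
  unfold boolList sufS
  rw [PySem.List.foldl_append_singleton_eq_map]
  congr 1
  rw [← range_map_bits n v, PySem.List.pyRange_zero_nat, List.map_map, List.nil_append]
  apply List.map_congr_left
  intro k _
  simp [Function.comp]

lemma join_cons_ne_nil (x : String) (xs : List String) (h : xs ≠ []) :
    PySem.Str.join ", " (x :: xs) = x ++ (", " ++ PySem.Str.join ", " xs) := by
  obtain ⟨y, ys, rfl⟩ := List.exists_cons_of_ne_nil h
  apply String.toList_inj.mp
  simp [PySem.Str.join, PySem.Chars.join_cons_cons, String.toList_append]

lemma bitStr_ne_empty (u : Int) : bitStr u ≠ "" := by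
  unfold bitStr; split <;> decide

lemma strJoin_singleton (x : String) : PySem.Str.join ", " [x] = x := by
  apply String.toList_inj.mp
  simp [PySem.Str.join, PySem.Chars.join_singleton]

lemma sufS_ne_empty (n : Nat) (v : Int) (h : 0 < n) : sufS v n ≠ "" := by
  obtain ⟨m, rfl⟩ := Nat.exists_eq_add_of_lt h
  rw [Nat.zero_add, sufS]
  show PySem.Str.join ", " (bitStr v :: (valsL (PySem.Int.floordiv v 2) m).map bitStr) ≠ ""
  rcases hm : (valsL (PySem.Int.floordiv v 2) m).map bitStr with _ | ⟨y, ys⟩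
  · rw [strJoin_singleton]
    exact bitStr_ne_empty v
  · rw [join_cons_ne_nil _ _ (by simp)]
    intro hc
    exact bitStr_ne_empty v (String.append_eq_empty_iff.mp hc).1

lemma sufS_succ (n : Nat) (v : Int) :
    sufS v (n + 1) = bitStr v ++
      (if sufS (PySem.Int.floordiv v 2) n ≠ "" then ", " ++ sufS (PySem.Int.floordiv v 2) n else "") := by
  rcases n with _ | m
  · rw [if_neg (by simp [sufS, valsL, PySem.Str.join])]
    show PySem.Str.join ", " [bitStr v] = _
    rw [strJoin_singleton]
    simp
  · rw [if_pos (sufS_ne_empty (m + 1) (PySem.Int.floordiv v 2) (Nat.succ_pos m)), sufS]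
    show PySem.Str.join ", " (bitStr v :: (valsL (PySem.Int.floordiv v 2) (m+1)).map bitStr) = _
    exact join_cons_ne_nil _ _ (by simp [valsL])

-- the main invariant: B's second fold over the reversed (value, bit) pairs of depth n
-- produces exactly A's recursive text, the joined bit list, and the counter n
lemma main_invariant (n : Nat) : ∀ v : Int,
    (((valsL v n).reverse).zip (((valsL v n).map bitStr).reverse)).foldl bStep
        ("    assert bits_of_int(" ++ PySem.Int.toStr (iterHalf v n) ++ ", 0) == [];", "", (0 : Int))
      = (proveFuel v (n : Int) (n + 1), sufS v n, (n : Int)) := by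
  induction n with
  | zero =>
    intro v
    simp only [valsL, List.map_nil, List.reverse_nil, List.zip_nil_left, List.foldl_nil]
    refine Prod.ext ?_ rfl
    show _ = proveFuel v 0 1
    simp only [proveFuel, iterHalf]
    rw [if_pos (show ((0 : Int) == 0) = true from rfl)]
    apply String.toList_inj.mp
    simp only [String.toList_append]
    have h0 : PySem.Int.toChars 0 = ['0'] := by decide
    simp [h0]
  | succ n ih =>
    intro v
    have hv : valsL v (n + 1) = v :: valsL (PySem.Int.floordiv v 2) n := rfl
    have hit : iterHalf v (n + 1) = iterHalf (PySem.Int.floordiv v 2) n := rfl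
    rw [hv, hit, List.reverse_cons, List.map_cons, List.reverse_cons,
      List.zip_append (by simp [length_valsL]), List.foldl_append, ih (PySem.Int.floordiv v 2)]
    simp only [List.zip_cons_cons, List.zip_nil_left, List.foldl_cons, List.foldl_nil]
    simp only [bStep]
    have hcast : ((n + 1 : Nat) : Int) = (n : Int) + 1 := by push_cast; ring
    have hb : boolList v 0 ((n : Int) + 1) = bitStr v ++
        (if sufS (PySem.Int.floordiv v 2) n ≠ "" then ", " ++ sufS (PySem.Int.floordiv v 2) n else "") := by
      rw [← hcast, boolList_eq_sufS (n + 1) v, sufS_succ]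
    refine Prod.ext ?_ (Prod.ext ?_ ?_)
    · show _ = proveFuel v ((n + 1 : Nat) : Int) (n + 1 + 1)
      rw [hcast]
      simp only [proveFuel]
      have hne : ¬((((n : Int) + 1) == 0) = true) := by simp only [beq_iff_eq]; omega
      rw [if_neg hne]
      have hs : ((n : Int) + 1) - 1 = (n : Int) := by ring
      rw [hb, hs]
      simp only [bitStr]
    · show _ = sufS v (n + 1)
      rw [sufS_succ]
    · show (n : Int) + 1 = ((n + 1 : Nat) : Int)
      push_cast; ring

lemma prove_eq_alt (n : Nat) (v : Int) : prove v (n : Int) = prove_alt v (n : Int) := by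
  have h := main_invariant n v
  unfold prove prove_alt
  simp only [bLoop1_spec n v, Int.toNat_natCast, h]

-- ===== VERDICT (by name: the statement is the Claim_ definition above) =====
theorem prove_spec : Claim_equal_prove := by
  intro v i _ hpre
  unfold Spec_prove
  obtain ⟨n, rfl⟩ := Int.eq_ofNat_of_zero_le hpre
  exact prove_eq_alt n v
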